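-- pv_equiv track=rewrite | github.com/Desom-fu/lanota-song-nonebot-plugin | lanota-song-nonebot-plugin/function.py | get_alias_name
-- ===== SOURCE A (Python) =====
-- def get_alias_name(name, item_dict, alias_dict):
--     """智能别名匹配"""
--     if name in item_dict:
--         return name
--
--     for std_name in alias_dict.keys():
--         if std_name in name:
--             return None
--
--     max_len = max(len(alias) for aliases in alias_dict.values() for alias in aliases) if alias_dict else 0
--     best_match = None
--     best_len = 0
--
--     for i in range(len(name)):
--         for l in range(min(max_len, len(name) - i), 0, -1):
--             substring = name[i:i+l]
--
--             for std_name, aliases in alias_dict.items():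
--                 if substring in aliases and l > best_len:
--                     best_match = (i, l, std_name)
--                     best_len = l
--
--     if best_match:
--         i, l, std_name = best_match
--         return name[:i] + std_name + name[i+l:]
--
--     return None
-- ===== SOURCE B (Python) =====
-- def get_alias_name(name, item_dict, alias_dict):
--     """Longest-alias substitution, rewritten as a direct scan: lengths descending,
--     positions ascending, returning at the first hit (no best-candidate tracking,
--     no max-length precomputation)."""
--     if name in item_dict:
--         return name
--     for std_name in alias_dict:
--         if std_name in name:
--             return None
--     for l in range(len(name), 0, -1):
--         for i in range(len(name) - l + 1):
--             substring = name[i:i+l]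
--             for std_name, aliases in alias_dict.items():
--                 if substring in aliases:
--                     return name[:i] + std_name + name[i+l:]
--     return None
-- ===== Notes on version B (the rewrite author's own statement) =====
-- stated objective: simpler
-- what changed: Instead of precomputing the max alias length and scanning all (position, length) substring cells while tracking a best candidate under a strict-improvement rule, B scans substrings by length descending then position ascending and returns at the very first alias hit, which is exactly A's winner (max length, then smallest index, then first dict entry containing that substring); B also drops the max() precomputation, so it returns None where A raises ValueError.
import Mathlib
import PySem

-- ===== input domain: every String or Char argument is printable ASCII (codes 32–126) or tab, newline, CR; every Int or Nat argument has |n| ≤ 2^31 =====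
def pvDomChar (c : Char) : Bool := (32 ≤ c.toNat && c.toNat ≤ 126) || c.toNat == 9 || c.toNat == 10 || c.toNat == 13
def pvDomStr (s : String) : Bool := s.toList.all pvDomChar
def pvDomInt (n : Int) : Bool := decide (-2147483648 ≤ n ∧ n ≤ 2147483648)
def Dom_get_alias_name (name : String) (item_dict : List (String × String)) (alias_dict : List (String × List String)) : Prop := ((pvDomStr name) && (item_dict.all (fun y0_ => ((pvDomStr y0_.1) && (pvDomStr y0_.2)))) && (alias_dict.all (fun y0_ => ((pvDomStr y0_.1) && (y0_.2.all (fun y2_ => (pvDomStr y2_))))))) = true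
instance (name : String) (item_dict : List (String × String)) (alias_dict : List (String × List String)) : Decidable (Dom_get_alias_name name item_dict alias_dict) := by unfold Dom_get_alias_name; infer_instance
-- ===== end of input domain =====

-- B replaces A's best-candidate tracking over all (position, length) substring cells by a
-- direct scan (length descending, then position ascending) that returns at the first alias
-- hit, and drops the max-alias-length precomputation; same return value wherever A returns.

-- ===== PORT A =====
def get_alias_name (name : String) (item_dict : List (String × String)) (alias_dict : List (String × List String)) : Option String :=
  if item_dict.any (fun p => p.1 == name) then some name
  else if alias_dict.any (fun p => PySem.Str.isIn p.1 name) then none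
  else
    -- Python's `max(...) if alias_dict else 0` raises ValueError when alias_dict is non-empty
    -- but every alias list is empty; those inputs are outside Pre_ (A returns nothing there),
    -- `.getD 0` keeps the port total and is exact wherever Python returns.
    let max_len : Int :=
      if alias_dict = [] then 0
      else (PySem.List.max? ((alias_dict.map Prod.snd).flatten.map PySem.Str.len) id).getD 0
    let n : Int := PySem.Str.len name
    let st :=
      (PySem.List.pyRange 0 n 1).foldl (fun st i =>
        (PySem.List.pyRange (min max_len (n - i)) 0 (-1)).foldl (fun st l =>
          let substring := PySem.Str.slice name (some i) (some (i + l))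
          alias_dict.foldl (fun st p =>
            if p.2.contains substring ∧ l > st.2 then (some (i, l, p.1), l) else st) st) st)
        ((none, 0) : Option (Int × Int × String) × Int)
    match st.1 with
    | some (i, l, std_name) =>
        some (PySem.Str.slice name none (some i) ++ std_name ++ PySem.Str.slice name (some (i + l)) none)
    | none => none

-- ===== PORT B =====
def get_alias_name_alt (name : String) (item_dict : List (String × String)) (alias_dict : List (String × List String)) : Option String :=
  if item_dict.any (fun p => p.1 == name) then some name
  else if alias_dict.any (fun p => PySem.Str.isIn p.1 name) then none
  else
    let n : Int := PySem.Str.len name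
    (PySem.List.pyRange n 0 (-1)).findSome? (fun l =>
      (PySem.List.pyRange 0 (n - l + 1) 1).findSome? (fun i =>
        let substring := PySem.Str.slice name (some i) (some (i + l))
        alias_dict.findSome? (fun p =>
          if p.2.contains substring then
            some (PySem.Str.slice name none (some i) ++ p.1 ++ PySem.Str.slice name (some (i + l)) none)
          else none)))

-- ===== PRECONDITION & SPEC =====
-- Pre_ excludes exactly the inputs on which Python A raises ValueError (max() of an empty
-- generator): both guards fail, alias_dict is non-empty and every alias list is empty.
def Pre_get_alias_name (name : String) (item_dict : List (String × String)) (alias_dict : List (String × List String)) : Prop :=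
  (item_dict.any (fun p => p.1 == name)) = true ∨
  (alias_dict.any (fun p => PySem.Str.isIn p.1 name)) = true ∨
  alias_dict = [] ∨
  (alias_dict.any (fun p => !p.2.isEmpty)) = true
instance (name : String) (item_dict : List (String × String)) (alias_dict : List (String × List String)) : Decidable (Pre_get_alias_name name item_dict alias_dict) := by unfold Pre_get_alias_name; infer_instance

def pvWitness_get_alias_name : String × (List (String × String)) × (List (String × List String)) :=
  ("lano 2", [("Dust", "id1")], [("Dust to Dust", ["lano"])])

def Spec_get_alias_name (name : String) (item_dict : List (String × String)) (alias_dict : List (String × List String)) (out : Option String) : Prop := out = get_alias_name_alt name item_dict alias_dict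
instance (name : String) (item_dict : List (String × String)) (alias_dict : List (String × List String)) (out : Option String) : Decidable (Spec_get_alias_name name item_dict alias_dict out) := by unfold Spec_get_alias_name; infer_instance

-- ===== CLAIM (what is proved, stated in full; the proofs are below) =====
def Claim_equal_get_alias_name : Prop := ∀ (name : String) (item_dict : List (String × String)) (alias_dict : List (String × List String)), Dom_get_alias_name name item_dict alias_dict → Pre_get_alias_name name item_dict alias_dict → Spec_get_alias_name name item_dict alias_dict (get_alias_name name item_dict alias_dict)


-- ===== LEMMAS AND PROOFS =====

-- first std_name in the dict whose alias list contains `sub` (shared by both analyses)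
def pvF (alias_dict : List (String × List String)) (sub : String) : Option String :=
  alias_dict.findSome? (fun p => if p.2.contains sub then some p.1 else none)

-- the hit at cell c = (i, l): pvF of name[i:i+l]
def pvHit (name : String) (alias_dict : List (String × List String)) (c : Int × Int) : Option String :=
  pvF alias_dict (PySem.Str.slice name (some c.1) (some (c.1 + c.2)))

def pvOut (name : String) (c : Int × Int) (std : String) : String :=
  PySem.Str.slice name none (some c.1) ++ std ++ PySem.Str.slice name (some (c.1 + c.2)) none

def pvCellsA (maxlen n : Int) : List (Int × Int) :=
  (PySem.List.pyRange 0 n 1).flatMap (fun i =>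
    (PySem.List.pyRange (min maxlen (n - i)) 0 (-1)).map (fun l => (i, l)))

def pvCellsB (n : Int) : List (Int × Int) :=
  (PySem.List.pyRange n 0 (-1)).flatMap (fun l =>
    (PySem.List.pyRange 0 (n - l + 1) 1).map (fun i => (i, l)))

-- c strictly preferred over d in B's scan order (longer, or same length and smaller index)
def pvLt (c d : Int × Int) : Prop := d.2 < c.2 ∨ (d.2 = c.2 ∧ c.1 < d.1)
def pvLe (c d : Int × Int) : Prop := d.2 < c.2 ∨ (d.2 = c.2 ∧ c.1 ≤ d.1)
-- A's scan order: position ascending, length descending within one position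
def pvScanA (c d : Int × Int) : Prop := c.1 < d.1 ∨ (c.1 = d.1 ∧ d.2 < c.2)

def pvLenOf : Option (Int × Int) → Int
  | none => 0
  | some c => c.2

def pvFoldA (name : String) (alias_dict : List (String × List String))
    (cs : List (Int × Int)) (b : Option (Int × Int)) : Option (Int × Int) :=
  cs.foldl (fun b c => if (pvHit name alias_dict c).isSome ∧ c.2 > pvLenOf b then some c else b) b

def pvEnc (name : String) (alias_dict : List (String × List String)) (b : Option (Int × Int)) :
    Option (Int × Int × String) × Int :=
  match b with
  | none => (none, 0)
  | some c => (some (c.1, c.2, (pvHit name alias_dict c).getD ""), c.2)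

theorem pvLe_refl (c : Int × Int) : pvLe c c := by simp [pvLe]

theorem pvLt_le {c d : Int × Int} (h : pvLt c d) : pvLe c d := by
  rcases h with h | h
  · exact Or.inl h
  · exact Or.inr ⟨h.1, le_of_lt h.2⟩

theorem pvLe_trans {c d e : Int × Int} (h1 : pvLe c d) (h2 : pvLe d e) : pvLe c e := by
  rcases h1 with h1 | h1 <;> rcases h2 with h2 | h2 <;> [skip; skip; skip; skip] <;>
    first
    | exact Or.inl (by omega)
    | exact Or.inr ⟨by omega, by omega⟩

theorem pvLe_antisymm {c d : Int × Int} (h1 : pvLe c d) (h2 : pvLe d c) : c = d := by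
  rcases c with ⟨ci, cl⟩; rcases d with ⟨di, dl⟩
  rcases h1 with h1 | h1 <;> rcases h2 with h2 | h2 <;> simp_all <;> omega

theorem pv_mem_countdown {a x : Int} : x ∈ PySem.List.pyRange a 0 (-1) ↔ 1 ≤ x ∧ x ≤ a := by
  rw [PySem.List.pyRange_neg_one]
  simp only [List.mem_map, List.mem_range]
  constructor
  · rintro ⟨k, hk, rfl⟩; omega
  · intro h; exact ⟨(a - x).toNat, by omega, by omega⟩

theorem pv_mem_up {a b x : Int} : x ∈ PySem.List.pyRange a b 1 ↔ a ≤ x ∧ x < b := by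
  rw [PySem.List.mem_pyRange_iff_of_pos (by norm_num)]
  exact ⟨fun ⟨h1, h2, _⟩ => ⟨h1, h2⟩, fun ⟨h1, h2⟩ => ⟨h1, h2, one_dvd _⟩⟩

theorem pv_mem_cellsA {maxlen n : Int} {c : Int × Int} :
    c ∈ pvCellsA maxlen n ↔ 0 ≤ c.1 ∧ c.1 < n ∧ 1 ≤ c.2 ∧ c.2 ≤ min maxlen (n - c.1) := by
  rcases c with ⟨i, l⟩
  unfold pvCellsA
  rw [List.mem_flatMap]
  constructor
  · rintro ⟨i', hi', hc⟩
    rw [pv_mem_up] at hi'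
    simp only [List.mem_map, Prod.mk.injEq] at hc
    rcases hc with ⟨l', hl', rfl, rfl⟩
    rw [pv_mem_countdown] at hl'
    simp only
    omega
  · rintro ⟨h1, h2, h3, h4⟩
    exact ⟨i, pv_mem_up.mpr ⟨h1, h2⟩,
      List.mem_map.mpr ⟨l, pv_mem_countdown.mpr ⟨h3, by omega⟩, rfl⟩⟩

theorem pv_mem_cellsB {n : Int} {c : Int × Int} :
    c ∈ pvCellsB n ↔ 1 ≤ c.2 ∧ c.2 ≤ n ∧ 0 ≤ c.1 ∧ c.1 ≤ n - c.2 := by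
  rcases c with ⟨i, l⟩
  unfold pvCellsB
  rw [List.mem_flatMap]
  constructor
  · rintro ⟨l', hl', hc⟩
    rw [pv_mem_countdown] at hl'
    simp only [List.mem_map, Prod.mk.injEq] at hc
    rcases hc with ⟨i', hi', rfl, rfl⟩
    rw [pv_mem_up] at hi'
    simp only
    omega
  · rintro ⟨h1, h2, h3, h4⟩
    exact ⟨l, pv_mem_countdown.mpr ⟨h1, h2⟩,
      List.mem_map.mpr ⟨i, pv_mem_up.mpr ⟨h3, by omega⟩, rfl⟩⟩

theorem pv_pairwise_up (a b : Int) : (PySem.List.pyRange a b 1).Pairwise (· < ·) := by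
  rw [PySem.List.pyRange_of_pos _ _ (by norm_num)]
  rw [List.pairwise_map]
  exact List.Pairwise.imp (fun h => by omega) List.pairwise_lt_range

theorem pv_pairwise_down (a : Int) : (PySem.List.pyRange a 0 (-1)).Pairwise (fun x y => y < x) := by
  rw [PySem.List.pyRange_neg_one]
  rw [List.pairwise_map]
  exact List.Pairwise.imp (fun h => by omega) List.pairwise_lt_range

theorem pv_pairwise_cellsA (maxlen n : Int) : (pvCellsA maxlen n).Pairwise pvScanA := by
  unfold pvCellsA
  rw [List.pairwise_flatMap]
  constructor
  · intro i _
    rw [List.pairwise_map]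
    exact List.Pairwise.imp (fun h => Or.inr ⟨rfl, h⟩) (pv_pairwise_down _)
  · refine List.Pairwise.imp ?_ (pv_pairwise_up 0 n)
    intro i1 i2 h x hx y hy
    simp only [List.mem_map] at hx hy
    rcases hx with ⟨l1, _, rfl⟩
    rcases hy with ⟨l2, _, rfl⟩
    exact Or.inl h

theorem pv_pairwise_cellsB (n : Int) : (pvCellsB n).Pairwise pvLt := by
  unfold pvCellsB
  rw [List.pairwise_flatMap]
  constructor
  · intro l _
    rw [List.pairwise_map]
    exact List.Pairwise.imp (fun h => Or.inr ⟨rfl, h⟩) (pv_pairwise_up _ _)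
  · refine List.Pairwise.imp ?_ (pv_pairwise_down n)
    intro l1 l2 h x hx y hy
    simp only [List.mem_map] at hx hy
    rcases hx with ⟨i1, _, rfl⟩
    rcases hy with ⟨i2, _, rfl⟩
    exact Or.inl h

-- a hit at a cell inside the name forces a non-empty dict and bounds the length by the max alias length
theorem pv_hit_le_maxlen {name : String} {ad : List (String × List String)} {c : Int × Int}
    (h0 : 0 ≤ c.1) (h1 : 1 ≤ c.2) (h2 : c.1 + c.2 ≤ PySem.Str.len name) {std : String}
    (hh : pvHit name ad c = some std) :
    ad ≠ [] ∧ c.2 ≤ (PySem.List.max? ((ad.map Prod.snd).flatten.map PySem.Str.len) id).getD 0 := by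
  unfold pvHit pvF at hh
  obtain ⟨p, hp, hps⟩ := List.exists_of_findSome?_eq_some hh
  set sub := PySem.Str.slice name (some c.1) (some (c.1 + c.2)) with hsub
  have hcont : sub ∈ p.2 := by
    by_cases hm : sub ∈ p.2
    · exact hm
    · simp [hm] at hps
  have hlen : PySem.Str.len sub = c.2 := by
    rw [PySem.Str.len_eq, hsub, PySem.Str.toList_slice, PySem.Chars.slice_eq_listSlice]
    rw [PySem.List.slice_toNat name.toList h0 (by omega)]
    rw [PySem.Str.len_eq] at h2
    simp only [List.length_take, List.length_drop]
    omega
  have hmemlen : c.2 ∈ (ad.map Prod.snd).flatten.map PySem.Str.len := by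
    rw [← hlen]
    exact List.mem_map.mpr ⟨sub, List.mem_flatten.mpr ⟨p.2, List.mem_map.mpr ⟨p, hp, rfl⟩, hcont⟩, rfl⟩
  refine ⟨fun hnil => by simp [hnil] at hp, ?_⟩
  cases hm : PySem.List.max? ((ad.map Prod.snd).flatten.map PySem.Str.len) id with
  | none =>
    rw [PySem.List.max?_eq_none_iff] at hm
    rw [hm] at hmemlen
    cases hmemlen
  | some m =>
    have := PySem.List.max?_isMax hm _ hmemlen
    simpa using this

-- the inner dict fold of A is a no-op once the running best length is not exceeded
theorem pv_dictfold_noop (ad : List (String × List String)) (sub : String) (i l : Int)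
    (st : Option (Int × Int × String) × Int) (h : ¬ l > st.2) :
    ad.foldl (fun st p => if p.2.contains sub ∧ l > st.2 then (some (i, l, p.1), l) else st) st = st := by
  induction ad with
  | nil => rfl
  | cons p ad ih =>
    simp only [List.foldl_cons]
    rw [if_neg (fun hc => h hc.2)]
    exact ih

-- the inner dict fold of A updates (with the first matching std_name) exactly when pvF hits
-- and the length strictly improves
theorem pv_dictfold_eq (ad : List (String × List String)) (sub : String) (i l : Int)
    (st : Option (Int × Int × String) × Int) :
    ad.foldl (fun st p => if p.2.contains sub ∧ l > st.2 then (some (i, l, p.1), l) else st) st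
      = match pvF ad sub with
        | some std => if l > st.2 then (some (i, l, std), l) else st
        | none => st := by
  induction ad generalizing st with
  | nil => rfl
  | cons p ad ih =>
    have hpvf : pvF (p :: ad) sub = if sub ∈ p.2 then some p.1 else pvF ad sub := by
      unfold pvF
      rw [List.findSome?_cons]
      by_cases hm : sub ∈ p.2 <;> simp [hm]
    rw [List.foldl_cons, hpvf]
    by_cases hm : sub ∈ p.2
    · rw [if_pos hm]
      by_cases hl : l > st.2
      · rw [if_pos ⟨List.contains_iff_mem.mpr hm, hl⟩]
        rw [pv_dictfold_noop ad sub i l _ (by simp)]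
        simp [hl]
      · rw [if_neg (fun hx => hl hx.2), pv_dictfold_noop ad sub i l st hl]
        simp [hl]
    · rw [if_neg hm, if_neg (fun hx => hm (List.contains_iff_mem.mp hx.1))]
      exact ih st

-- the (best_match, best_len) pair state of A collapses to an Option-of-cell state
theorem pv_collapse (name : String) (ad : List (String × List String))
    (cs : List (Int × Int)) (b : Option (Int × Int)) :
    cs.foldl (fun st c =>
        match pvHit name ad c with
        | some std => if c.2 > st.2 then (some (c.1, c.2, std), c.2) else st
        | none => st) (pvEnc name ad b)
      = pvEnc name ad (pvFoldA name ad cs b) := by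
  induction cs generalizing b with
  | nil => rfl
  | cons c cs ih =>
    unfold pvFoldA
    simp only [List.foldl_cons]
    have hstep : (match pvHit name ad c with
        | some std => if c.2 > (pvEnc name ad b).2 then (some (c.1, c.2, std), c.2) else pvEnc name ad b
        | none => pvEnc name ad b)
        = pvEnc name ad (if (pvHit name ad c).isSome ∧ c.2 > pvLenOf b then some c else b) := by
      cases hh : pvHit name ad c with
      | none => simp
      | some std =>
        cases b with
        | none =>
          simp only [pvEnc, pvLenOf, Option.isSome_some, true_and]
          split_ifs <;> simp [hh]
        | some bc =>
          simp only [pvEnc, pvLenOf, Option.isSome_some, true_and]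
          split_ifs <;> simp [hh]
    rw [hstep]
    exact ih _

-- running A's strict-improvement fold from an accumulator that precedes (in scan order)
-- every remaining cell yields the best hit in pvLe order
theorem pv_foldA_some (name : String) (ad : List (String × List String)) (cs : List (Int × Int))
    (b : Int × Int)
    (hp : cs.Pairwise pvScanA) (hb : ∀ c ∈ cs, pvScanA b c) (hbh : (pvHit name ad b).isSome) :
    ∃ m, pvFoldA name ad cs (some b) = some m ∧ (m = b ∨ m ∈ cs) ∧ (pvHit name ad m).isSome ∧
      pvLe m b ∧ ∀ d ∈ cs, (pvHit name ad d).isSome → pvLe m d := by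
  induction cs generalizing b with
  | nil => exact ⟨b, rfl, Or.inl rfl, hbh, pvLe_refl b, by simp⟩
  | cons c cs ih =>
    rw [List.pairwise_cons] at hp
    unfold pvFoldA
    simp only [List.foldl_cons, pvLenOf]
    by_cases hcond : (pvHit name ad c).isSome ∧ c.2 > b.2
    · rw [if_pos hcond]
      obtain ⟨m, hm, hmem, hhit, hle, hmin⟩ := ih c hp.2 hp.1 hcond.1
      refine ⟨m, hm, ?_, hhit, ?_, ?_⟩
      · rcases hmem with h | h
        · exact Or.inr (h ▸ List.mem_cons_self ..)
        · exact Or.inr (List.mem_cons_of_mem _ h)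
      · exact pvLe_trans hle (Or.inl hcond.2)
      · intro d hd hdh
        rcases List.mem_cons.mp hd with rfl | hd
        · exact hle
        · exact hmin d hd hdh
    · rw [if_neg hcond]
      obtain ⟨m, hm, hmem, hhit, hle, hmin⟩ := ih b hp.2 (fun d hd => hb d (List.mem_cons_of_mem _ hd)) hbh
      refine ⟨m, hm, ?_, hhit, hle, ?_⟩
      · rcases hmem with h | h
        · exact Or.inl h
        · exact Or.inr (List.mem_cons_of_mem _ h)
      · intro d hd hdh
        rcases List.mem_cons.mp hd with rfl | hd
        · -- c has a hit but did not improve: c.2 ≤ b.2, and b scans before c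
          have hc2 : d.2 ≤ b.2 := by
            by_contra hgt
            exact hcond ⟨hdh, by omega⟩
          have hbc := hb d (List.mem_cons_self ..)
          refine pvLe_trans hle ?_
          rcases hbc with h | h
          · rcases lt_or_eq_of_le hc2 with h2 | h2
            · exact Or.inl h2
            · exact Or.inr ⟨h2, le_of_lt h⟩
          · exact Or.inl h.2
        · exact hmin d hd hdh

-- A's fold from the empty accumulator: either no cell hits, or it returns the pvLe-best hit
theorem pv_foldA_char (name : String) (ad : List (String × List String)) (cs : List (Int × Int))
    (hp : cs.Pairwise pvScanA) (hl : ∀ c ∈ cs, 1 ≤ c.2) :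
    (pvFoldA name ad cs none = none ∧ ∀ c ∈ cs, pvHit name ad c = none) ∨
    (∃ m, pvFoldA name ad cs none = some m ∧ m ∈ cs ∧ (pvHit name ad m).isSome ∧
      ∀ d ∈ cs, (pvHit name ad d).isSome → pvLe m d) := by
  induction cs with
  | nil => exact Or.inl ⟨rfl, by simp⟩
  | cons c cs ih =>
    rw [List.pairwise_cons] at hp
    unfold pvFoldA
    simp only [List.foldl_cons, pvLenOf]
    by_cases hch : (pvHit name ad c).isSome
    · rw [if_pos ⟨hch, by have := hl c (List.mem_cons_self ..); omega⟩]
      obtain ⟨m, hm, hmem, hhit, hle, hmin⟩ := pv_foldA_some name ad cs c hp.2 hp.1 hch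
      refine Or.inr ⟨m, hm, ?_, hhit, ?_⟩
      · rcases hmem with h | h
        · exact h ▸ List.mem_cons_self ..
        · exact List.mem_cons_of_mem _ h
      · intro d hd hdh
        rcases List.mem_cons.mp hd with rfl | hd
        · exact hle
        · exact hmin d hd hdh
    · rw [if_neg (fun hx => hch hx.1)]
      rcases ih hp.2 (fun d hd => hl d (List.mem_cons_of_mem _ hd)) with ⟨hres, hnone⟩ | ⟨m, hm, hmem, hhit, hmin⟩
      · refine Or.inl ⟨hres, ?_⟩
        intro d hd
        rcases List.mem_cons.mp hd with rfl | hd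
        · exact Option.not_isSome_iff_eq_none.mp hch
        · exact hnone d hd
      · refine Or.inr ⟨m, hm, List.mem_cons_of_mem _ hmem, hhit, ?_⟩
        intro d hd hdh
        rcases List.mem_cons.mp hd with rfl | hd
        · exact absurd hdh hch
        · exact hmin d hd hdh

-- B's inner dict scan is pvF followed by building the output string
theorem pv_findSome?_if_map (ad : List (String × List String)) (sub : String) (g : String → String) :
    ad.findSome? (fun p => if p.2.contains sub then some (g p.1) else none) = (pvF ad sub).map g := by
  induction ad with
  | nil => rfl
  | cons p ad ih =>
    simp only [pvF, List.findSome?_cons, List.contains_iff_mem] at ih ⊢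
    by_cases hm : sub ∈ p.2 <;> simp [hm, ih]

theorem pv_findSome?_flatMap {α β γ : Type} (l : List α) (f : α → List β) (g : β → Option γ) :
    (l.flatMap f).findSome? g = l.findSome? (fun x => (f x).findSome? g) := by
  induction l with
  | nil => rfl
  | cons x l ih =>
    rw [List.flatMap_cons, List.findSome?_append, ih, List.findSome?_cons]
    cases (f x).findSome? g <;> simp [Option.or]

-- findSome? over a pvLt-sorted list returns a hit that is pvLe-minimal among all hits
theorem pv_findSome?_sorted {g : (Int × Int) → Option String} (cs : List (Int × Int))
    (hp : cs.Pairwise pvLt) {y : String} (h : cs.findSome? g = some y) :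
    ∃ c ∈ cs, g c = some y ∧ ∀ d ∈ cs, (g d).isSome → pvLe c d := by
  induction cs with
  | nil => simp at h
  | cons c cs ih =>
    rw [List.pairwise_cons] at hp
    rw [List.findSome?_cons] at h
    cases hgc : g c with
    | some y' =>
      rw [hgc] at h
      simp only at h
      injection h with h
      subst h
      refine ⟨c, List.mem_cons_self .., hgc, ?_⟩
      intro d hd _
      rcases List.mem_cons.mp hd with rfl | hd
      · exact pvLe_refl d
      · exact pvLt_le (hp.1 d hd)
    | none =>
      rw [hgc] at h
      simp only at h
      obtain ⟨c', hc', hgc', hmin⟩ := ih hp.2 h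
      refine ⟨c', List.mem_cons_of_mem _ hc', hgc', ?_⟩
      intro d hd hdh
      rcases List.mem_cons.mp hd with rfl | hd
      · rw [hgc] at hdh; cases hdh
      · exact hmin d hd hdh

theorem pv_cellsA_sub_B {maxlen n : Int} {c : Int × Int} (h : c ∈ pvCellsA maxlen n) :
    c ∈ pvCellsB n := by
  rw [pv_mem_cellsA] at h
  rw [pv_mem_cellsB]
  omega

theorem pv_cellsB_hit_sub_A {name : String} {ad : List (String × List String)} {c : Int × Int}
    {std : String} (h : c ∈ pvCellsB (PySem.Str.len name)) (hh : pvHit name ad c = some std) :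
    c ∈ pvCellsA (if ad = [] then 0 else (PySem.List.max? ((ad.map Prod.snd).flatten.map PySem.Str.len) id).getD 0)
      (PySem.Str.len name) := by
  rw [pv_mem_cellsB] at h
  obtain ⟨hne, hbound⟩ := pv_hit_le_maxlen (by omega) (by omega) (by omega) hh
  rw [pv_mem_cellsA, if_neg hne]
  omega

-- ===== VERDICT (by name: the statement is the Claim_ definition above) =====
theorem get_alias_name_spec : Claim_equal_get_alias_name := by
  intro name idict ad _ _
  unfold Spec_get_alias_name get_alias_name get_alias_name_alt
  by_cases h1 : (idict.any fun p => p.1 == name) = true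
  · rw [if_pos h1, if_pos h1]
  · rw [if_neg h1, if_neg h1]
    by_cases h2 : (ad.any fun p => PySem.Str.isIn p.1 name) = true
    · rw [if_pos h2, if_pos h2]
    · rw [if_neg h2, if_neg h2]
      simp only []
      set M : Int := if ad = [] then 0 else (PySem.List.max? ((ad.map Prod.snd).flatten.map PySem.Str.len) id).getD 0 with hMdef
      set N : Int := PySem.Str.len name with hNdef
      have hA : (PySem.List.pyRange 0 N 1).foldl
          (fun st i => (PySem.List.pyRange (min M (N - i)) 0 (-1)).foldl
            (fun st l => ad.foldl (fun st p =>
              if p.2.contains (PySem.Str.slice name (some i) (some (i + l))) ∧ l > st.2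
              then (some (i, l, p.1), l) else st) st) st)
          ((none, 0) : Option (Int × Int × String) × Int)
          = pvEnc name ad (pvFoldA name ad (pvCellsA M N) none) := by
        rw [show ((none, 0) : Option (Int × Int × String) × Int) = pvEnc name ad none from rfl]
        rw [← pv_collapse]
        unfold pvCellsA
        rw [List.foldl_flatMap]
        congr 1
        funext st i
        rw [List.foldl_map]
        congr 1
        funext st l
        rw [pv_dictfold_eq]
        rfl
      have hB : (PySem.List.pyRange N 0 (-1)).findSome? (fun l =>
          (PySem.List.pyRange 0 (N - l + 1) 1).findSome? (fun i =>
            ad.findSome? (fun p =>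
              if p.2.contains (PySem.Str.slice name (some i) (some (i + l)))
              then some (PySem.Str.slice name none (some i) ++ p.1 ++ PySem.Str.slice name (some (i + l)) none)
              else none)))
          = (pvCellsB N).findSome? (fun c => (pvHit name ad c).map (pvOut name c)) := by
        unfold pvCellsB
        rw [pv_findSome?_flatMap]
        congr 1
        funext l
        rw [List.findSome?_map]
        congr 1
        funext i
        exact pv_findSome?_if_map ad _ (fun std =>
          PySem.Str.slice name none (some i) ++ std ++ PySem.Str.slice name (some (i + l)) none)
      rw [hA, hB]
      rcases pv_foldA_char name ad (pvCellsA M N) (pv_pairwise_cellsA M N)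
          (fun c hc => (pv_mem_cellsA.mp hc).2.2.1) with ⟨hres, hnone⟩ | ⟨m, hres, hmem, hhit, hmin⟩
      · rw [hres]
        have hBnone : (pvCellsB N).findSome? (fun c => (pvHit name ad c).map (pvOut name c)) = none := by
          rw [List.findSome?_eq_none_iff]
          intro c hc
          cases hh : pvHit name ad c with
          | none => rfl
          | some std => exact absurd (hnone c (pv_cellsB_hit_sub_A hc hh)) (by simp [hh])
        rw [hBnone]
        rfl
      · rw [hres]
        obtain ⟨std, hstd⟩ := Option.isSome_iff_exists.mp hhit
        cases hfb : (pvCellsB N).findSome? (fun c => (pvHit name ad c).map (pvOut name c)) with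
        | none =>
          rw [List.findSome?_eq_none_iff] at hfb
          have := hfb m (pv_cellsA_sub_B hmem)
          rw [hstd] at this
          cases this
        | some y =>
          obtain ⟨c, hcB, hgc, hminB⟩ := pv_findSome?_sorted _ (pv_pairwise_cellsB N) hfb
          cases hhc : pvHit name ad c with
          | none => rw [hhc] at hgc; cases hgc
          | some stdc =>
            rw [hhc] at hgc
            have hy : y = pvOut name c stdc := by
              injection hgc with h
              exact h.symm
            have hmc : m = c := by
              refine pvLe_antisymm ?_ ?_
              · exact hmin c (pv_cellsB_hit_sub_A hcB hhc) (by simp [hhc])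
              · exact hminB m (pv_cellsA_sub_B hmem) (by simp [hstd])
            subst hmc
            rw [hstd] at hhc
            injection hhc with hsc
            subst hsc
            rw [hy]
            simp [pvEnc, hstd, pvOut]
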